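-- pv_equiv track=rewrite | github.com/patorsiang/ctf-writeups | LA-CTF-2025/misc/extended/main.py | reverse_extended_flag
-- ===== SOURCE A (Python) =====
-- def reverse_extended_flag(extended_flag):
--     original_flag = ""
--
--     for c in extended_flag:
--         o = bin(ord(c))[2:].zfill(8)  # Convert to 8-bit binary
--
--         # Replace the first '1' with '0' to reverse the transformation
--         for i in range(8):
--             if o[i] == "1":
--                 o = o[:i] + "0" + o[i + 1:]
--                 break
--
--         original_flag += chr(int(o, 2))  # Convert back to character
--
--     return original_flag
-- ===== SOURCE B (Python) =====
-- def reverse_extended_flag(extended_flag):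
--     out = []
--     for c in extended_flag:
--         n = ord(c)
--         if n:
--             n -= 1 << (n.bit_length() - 1)  # clear the highest set bit
--         out.append(chr(n))
--     return "".join(out)
-- ===== Notes on version B (the rewrite author's own statement) =====
-- stated objective: simpler
-- what changed: Replaces the per-char 8-bit binary-string build, scan and rebuild with direct integer bit arithmetic (clear the highest set bit via bit_length), joining the results.
import Mathlib
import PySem

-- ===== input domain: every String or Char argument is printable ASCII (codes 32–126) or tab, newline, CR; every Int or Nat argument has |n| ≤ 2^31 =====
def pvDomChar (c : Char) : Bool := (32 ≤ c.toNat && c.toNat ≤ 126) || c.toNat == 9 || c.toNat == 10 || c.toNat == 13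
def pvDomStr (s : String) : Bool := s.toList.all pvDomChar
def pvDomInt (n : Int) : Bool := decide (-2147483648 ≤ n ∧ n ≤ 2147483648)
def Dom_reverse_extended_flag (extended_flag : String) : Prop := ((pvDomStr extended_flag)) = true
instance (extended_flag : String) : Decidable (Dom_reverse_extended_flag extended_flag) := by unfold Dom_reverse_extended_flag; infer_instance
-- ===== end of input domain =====

-- B replaces A's per-char 8-bit binary-string build/scan/rebuild with direct
-- integer bit arithmetic (clear the highest set bit via bit_length); same values.

-- ===== PORT A =====
-- bin(n)[2:] : binary digits of n, MSB first ('0' for n = 0), as in Python's bin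
-- (fuel = n, a totality device only: n halves each step, so n steps always suffice)
def pvBinAux : Nat → Nat → List Char
  | 0, _ => []
  | fuel + 1, n =>
    if n = 0 then [] else pvBinAux fuel (n / 2) ++ [if n % 2 = 1 then '1' else '0']

def pvBin (n : Nat) : List Char := if n = 0 then ['0'] else pvBinAux n n

-- .zfill(8) : pad on the left with '0' to length 8
def pvZfill8 (o : List Char) : List Char :=
  List.replicate (8 - o.length) '0' ++ o

-- the inner 'for i in range(8): if o[i] == "1": replace; break'
-- (k counts the remaining iterations; i = 8 - k; called with k = 8)
def pvClearFirstAux (o : List Char) : Nat → List Char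
  | 0 => o
  | k + 1 =>
    let i := 8 - (k + 1)
    if o.getD i ' ' = '1' then o.take i ++ ['0'] ++ o.drop (i + 1)
    else pvClearFirstAux o k

def pvClearFirst (o : List Char) : List Char := pvClearFirstAux o 8

-- int(o, 2)
def pvIntOfBin (o : List Char) : Nat :=
  o.foldl (fun acc d => 2 * acc + (if d = '1' then 1 else 0)) 0

-- per-char body of A's loop, on the code point
def pvACore (n : Nat) : Nat :=
  pvIntOfBin (pvClearFirst (pvZfill8 (pvBin n)))

def reverse_extended_flag (extended_flag : String) : String :=
  String.mk (extended_flag.toList.foldl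
    (fun acc c => acc ++ [Char.ofNat (pvACore c.toNat)]) [])

-- ===== PORT B =====
-- per-char body of B: clear the highest set bit of n (0 stays 0)
def pvBCore (n : Nat) : Nat :=
  if n = 0 then 0 else n - 2 ^ (PySem.Int.bitLength (n : Int) - 1)

def reverse_extended_flag_alt (extended_flag : String) : String :=
  String.mk (extended_flag.toList.map (fun c => Char.ofNat (pvBCore c.toNat)))

-- ===== PRECONDITION & SPEC =====
def Spec_reverse_extended_flag (extended_flag : String) (out : String) : Prop := out = reverse_extended_flag_alt extended_flag
instance (extended_flag : String) (out : String) : Decidable (Spec_reverse_extended_flag extended_flag out) := by unfold Spec_reverse_extended_flag; infer_instance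

-- ===== CLAIM (what is proved, stated in full; the proofs are below) =====
def Claim_equal_reverse_extended_flag : Prop := ∀ (extended_flag : String), Dom_reverse_extended_flag extended_flag → Spec_reverse_extended_flag extended_flag (reverse_extended_flag extended_flag)

-- ===== LEMMAS AND PROOFS =====

-- the two per-char bodies agree on every code point below 127 (Dom's range)
theorem pvCore_eq : ∀ n, n < 127 → pvACore n = pvBCore n := by decide

theorem pvCharLt (c : Char) (h : pvDomChar c = true) : c.toNat < 127 := by
  simp [pvDomChar] at h; omega

-- ===== VERDICT (by name: the statement is the Claim_ definition above) =====
theorem reverse_extended_flag_spec : Claim_equal_reverse_extended_flag := by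
  intro s hdom
  unfold Spec_reverse_extended_flag reverse_extended_flag reverse_extended_flag_alt
  rw [PySem.List.foldl_append_singleton_eq_map]
  have hall : ∀ c ∈ s.toList, pvDomChar c = true := by
    simpa [Dom_reverse_extended_flag, pvDomStr, List.all_eq_true] using hdom
  congr 1
  exact List.map_congr_left fun c hc =>
    congrArg Char.ofNat (pvCore_eq c.toNat (pvCharLt c (hall c hc)))
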